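-- pv_equiv track=rewrite | github.com/josephtingiris/vscode-gigachad-keybindings | keybindings-remove.py | split_units
-- ===== SOURCE A (Python) =====
-- def split_units(array_text: str):
--     # Each unit: (comments/whitespace before, object, trailing comma, whitespace)
--     units = []
--     lines = array_text.splitlines(keepends=True)
--     i = 0
--     n = len(lines)
--     while i < n:
--         comments = ''
--         # Gather comments/whitespace before object
--         while i < n and '{' not in lines[i]:
--             comments += lines[i]
--             i += 1
--         if i >= n:
--             break
--         # Gather object
--         obj_lines = ''
--         depth = 0
--         started = False
--         while i < n:
--             line = lines[i]
--             if '{' in line: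
--                 started = True
--                 depth += line.count('{')
--             if started:
--                 obj_lines += line
--             if '}' in line:
--                 depth -= line.count('}')
--                 if depth == 0:
--                     i += 1
--                     break
--             i += 1
--         # Gather trailing comma and whitespace
--         trailing = ''
--         while i < n and (lines[i].strip().startswith(',') or lines[i].strip() == '' or lines[i].strip().startswith('//') or lines[i].strip().startswith('/*')):
--             trailing += lines[i]
--             i += 1
--         units.append((comments, obj_lines, trailing))
--     return units
-- ===== SOURCE B (Python) =====
-- def split_units(array_text: str):
--     # Single-pass state machine (COMMENTS / OBJECT / TRAILING) instead of nested scanning loops.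
--     COMMENTS, OBJECT, TRAILING = 0, 1, 2
--     units = []
--     state = COMMENTS
--     comments = obj = trailing = ''
--     depth = 0
--     started = False
--     lines = array_text.splitlines(keepends=True)
--     idx = 0
--     while idx < len(lines):
--         line = lines[idx]
--         if state == COMMENTS:
--             if '{' in line:
--                 state = OBJECT          # reprocess this line as object text
--             else:
--                 comments += line
--                 idx += 1
--         elif state == OBJECT:
--             if '{' in line:
--                 started = True
--                 depth += line.count('{')
--             if started:
--                 obj += line
--             if '}' in line:
--                 depth -= line.count('}')
--                 if depth == 0:
--                     state = TRAILING
--             idx += 1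
--         else:  # TRAILING
--             s = line.strip()
--             if s.startswith(',') or s == '' or s.startswith('//') or s.startswith('/*'):
--                 trailing += line
--                 idx += 1
--             else:
--                 units.append((comments, obj, trailing))
--                 comments = obj = trailing = ''
--                 depth = 0
--                 started = False
--                 state = COMMENTS        # reprocess this line as the next unit's comments
--     if state != COMMENTS:
--         units.append((comments, obj, trailing))
--     return units
-- ===== Notes on version B (the rewrite author's own statement) =====
-- stated objective: alternative
-- what changed: Replaced A's outer loop with three nested per-unit scanning loops by a single flat loop over the lines driven by an explicit COMMENTS/OBJECT/TRAILING state machine that carries the current unit's three buffers and the brace depth, flushing a partial unit at EOF.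
import Mathlib
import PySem

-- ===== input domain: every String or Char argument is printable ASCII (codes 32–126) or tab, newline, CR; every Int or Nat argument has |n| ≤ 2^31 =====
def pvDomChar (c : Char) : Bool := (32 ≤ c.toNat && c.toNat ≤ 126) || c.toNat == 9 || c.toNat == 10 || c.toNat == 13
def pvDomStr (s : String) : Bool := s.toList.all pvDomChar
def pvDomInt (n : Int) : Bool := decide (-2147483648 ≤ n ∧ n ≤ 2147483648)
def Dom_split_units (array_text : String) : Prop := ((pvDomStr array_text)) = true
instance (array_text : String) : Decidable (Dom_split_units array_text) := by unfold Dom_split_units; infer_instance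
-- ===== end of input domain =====

-- B replaces A's nested per-unit scanning loops by a single flat state-machine loop over the lines (different decomposition; same cost).


-- shared helpers: both Pythons apply the very same built-ins to each line.
-- str.splitlines(keepends=True) ported by hand (PySem.Str.splitlines drops the ends);
-- exact on Dom, where the only line breaks are '\n', '\r', '\r\n'.
def pvLinesKeep (cs : List Char) (cur : List Char) : List (List Char) :=
  match cs with
  | [] => if cur = [] then [] else [cur]
  | '\r' :: '\n' :: rest => (cur ++ ['\r', '\n']) :: pvLinesKeep rest []
  | '\r' :: rest => (cur ++ ['\r']) :: pvLinesKeep rest []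
  | '\n' :: rest => (cur ++ ['\n']) :: pvLinesKeep rest []
  | c :: rest => pvLinesKeep rest (cur ++ [c])
termination_by cs.length

def pvHasLB (l : List Char) : Bool := PySem.Chars.isIn ['{'] l      -- '{' in line
def pvHasRB (l : List Char) : Bool := PySem.Chars.isIn ['}'] l      -- '}' in line
def pvTrailPred (l : List Char) : Bool :=                           -- the trailing-line test, in A's order
  let s := PySem.Chars.strip l
  PySem.Chars.startswith s [','] || s == [] || PySem.Chars.startswith s ['/', '/'] ||
    PySem.Chars.startswith s ['/', '*']

-- ===== PORT A =====
-- inner while-loop: gather comments/whitespace before the object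
def pvGatherComments : List (List Char) → List Char → List Char × List (List Char)
  | [], c => (c, [])
  | l :: rest, c => if pvHasLB l then (c, l :: rest) else pvGatherComments rest (c ++ l)

-- inner while-loop: gather the object with brace counting
-- ('if "{" in line: started = True; depth += count' = the started/depth lets; 'i += 1; break' = return the rest)
def pvGatherObject : List (List Char) → List Char → Int → Bool → List Char × List (List Char)
  | [], o, _, _ => (o, [])
  | l :: rest, o, depth, started =>
    let started := started || pvHasLB l
    let depth := if pvHasLB l then depth + (PySem.Chars.count l ['{'] : Int) else depth
    let o := if started then o ++ l else o
    if pvHasRB l then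
      let depth := depth - (PySem.Chars.count l ['}'] : Int)
      if depth = 0 then (o, rest) else pvGatherObject rest o depth started
    else pvGatherObject rest o depth started

-- inner while-loop: gather trailing comma / whitespace / comments
def pvGatherTrailing : List (List Char) → List Char → List Char × List (List Char)
  | [], t => (t, [])
  | l :: rest, t => if pvTrailPred l then pvGatherTrailing rest (t ++ l) else (t, l :: rest)

-- termination facts for A's outer while-loop (each pass consumes at least the object's first line)
theorem pvGatherComments_len (ls : List (List Char)) (c : List Char) :
    (pvGatherComments ls c).2.length ≤ ls.length := by
  induction ls generalizing c with
  | nil => simp [pvGatherComments]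
  | cons l rest ih =>
    rw [pvGatherComments]
    split
    · simp
    · exact (ih _).trans (Nat.le_succ _)

theorem pvGatherObject_len' (ls : List (List Char)) (o : List Char) (d : Int) (s : Bool) :
    (pvGatherObject ls o d s).2.length ≤ ls.length - 1 := by
  induction ls generalizing o d s with
  | nil => simp [pvGatherObject]
  | cons l rest ih =>
    simp only [pvGatherObject]
    split_ifs <;> simp <;> exact (ih _ _ _).trans (Nat.sub_le _ _)

theorem pvGatherObject_len (ls : List (List Char)) (o : List Char) (d : Int) (s : Bool)
    (h : ls ≠ []) : (pvGatherObject ls o d s).2.length < ls.length := by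
  have h1 := pvGatherObject_len' ls o d s
  have h2 : 1 ≤ ls.length := List.length_pos_iff.mpr h
  omega

theorem pvGatherTrailing_len (ls : List (List Char)) (t : List Char) :
    (pvGatherTrailing ls t).2.length ≤ ls.length := by
  induction ls generalizing t with
  | nil => simp [pvGatherTrailing]
  | cons l rest ih =>
    rw [pvGatherTrailing]
    split
    · exact (ih _).trans (Nat.le_succ _)
    · simp

-- A's outer while-loop ('if i >= n: break' = the dite's then-branch)
def pvOuterA (ls : List (List Char)) (units : List (String × String × String)) :
    List (String × String × String) :=
  if _h : (pvGatherComments ls []).2 = [] then units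
  else
    -- comments = the gathered prefix, object = the brace-balanced block, trailing = the comma/comment tail
    pvOuterA (pvGatherTrailing (pvGatherObject (pvGatherComments ls []).2 [] 0 false).2 []).2
      (units ++
        [(String.ofList (pvGatherComments ls []).1,
          String.ofList (pvGatherObject (pvGatherComments ls []).2 [] 0 false).1,
          String.ofList (pvGatherTrailing (pvGatherObject (pvGatherComments ls []).2 [] 0 false).2 []).1)])
termination_by ls.length
decreasing_by
  calc (pvGatherTrailing (pvGatherObject (pvGatherComments ls []).2 [] 0 false).2 []).2.length
      ≤ (pvGatherObject (pvGatherComments ls []).2 [] 0 false).2.length := pvGatherTrailing_len _ _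
    _ < (pvGatherComments ls []).2.length := pvGatherObject_len _ _ _ _ _h
    _ ≤ ls.length := pvGatherComments_len _ _

def split_units (array_text : String) : List (String × String × String) :=
  pvOuterA (pvLinesKeep array_text.toList []) []

-- ===== PORT B =====
inductive PvState
  | comments
  | object
  | trailing
deriving DecidableEq, Repr

def pvRank : PvState → Nat
  | .trailing => 2
  | .comments => 1
  | .object => 0

-- B's single flat loop: one step per line, driven by the state enum; flush the partial unit at EOF
def pvRunB : List (List Char) → PvState → List Char → List Char → List Char → Int → Bool →
    List (String × String × String) → List (String × String × String)
  | [], st, c, o, t, _, _, units =>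
      if st = PvState.comments then units
      else units ++ [(String.ofList c, String.ofList o, String.ofList t)]
  | l :: rest, PvState.comments, c, o, t, depth, started, units =>
      if pvHasLB l then pvRunB (l :: rest) .object c o t depth started units
      else pvRunB rest .comments (c ++ l) o t depth started units
  | l :: rest, PvState.object, c, o, t, depth, started, units =>
      let started := started || pvHasLB l
      let depth := if pvHasLB l then depth + (PySem.Chars.count l ['{'] : Int) else depth
      let o := if started then o ++ l else o
      if pvHasRB l then
        let depth := depth - (PySem.Chars.count l ['}'] : Int)
        if depth = 0 then pvRunB rest .trailing c o t depth started units
        else pvRunB rest .object c o t depth started units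
      else pvRunB rest .object c o t depth started units
  | l :: rest, PvState.trailing, c, o, t, depth, started, units =>
      if pvTrailPred l then pvRunB rest .trailing c o (t ++ l) depth started units
      else pvRunB (l :: rest) .comments [] [] [] 0 false
            (units ++ [(String.ofList c, String.ofList o, String.ofList t)])
termination_by ls st _ _ _ _ _ _ => (ls.length, pvRank st)
decreasing_by
  all_goals simp [Prod.lex_iff, pvRank]

def split_units_alt (array_text : String) : List (String × String × String) :=
  pvRunB (pvLinesKeep array_text.toList []) .comments [] [] [] 0 false []

-- ===== PRECONDITION & SPEC =====
def Spec_split_units (array_text : String) (out : List (String × String × String)) : Prop := out = split_units_alt array_text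
instance (array_text : String) (out : List (String × String × String)) : Decidable (Spec_split_units array_text out) := by unfold Spec_split_units; infer_instance

-- ===== CLAIM (what is proved, stated in full; the proofs are below) =====
def Claim_equal_split_units : Prop := ∀ (array_text : String), Dom_split_units array_text → Spec_split_units array_text (split_units array_text)

-- ===== LEMMAS AND PROOFS =====
-- B's TRAILING run computes A's trailing gather, then pushes the unit (also at EOF)
theorem pvRunB_trailing (ls : List (List Char)) (c o t : List Char) (d : Int) (s : Bool)
    (units : List (String × String × String)) :
    pvRunB ls .trailing c o t d s units =
      (if (pvGatherTrailing ls t).2 = [] then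
        units ++ [(String.ofList c, String.ofList o, String.ofList (pvGatherTrailing ls t).1)]
      else pvRunB (pvGatherTrailing ls t).2 .comments [] [] [] 0 false
        (units ++ [(String.ofList c, String.ofList o, String.ofList (pvGatherTrailing ls t).1)])) := by
  induction ls generalizing t with
  | nil => rw [pvRunB]; simp [pvGatherTrailing]
  | cons l rest ih =>
    rw [pvRunB, pvGatherTrailing]
    split
    · exact ih _
    · simp

-- B's OBJECT run computes A's object gather, then behaves as the trailing run
theorem pvRunB_object (ls : List (List Char)) (c o t : List Char) (d : Int) (s : Bool)
    (units : List (String × String × String)) :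
    pvRunB ls .object c o t d s units =
      (if (pvGatherTrailing (pvGatherObject ls o d s).2 t).2 = [] then
        units ++ [(String.ofList c, String.ofList (pvGatherObject ls o d s).1,
          String.ofList (pvGatherTrailing (pvGatherObject ls o d s).2 t).1)]
      else pvRunB (pvGatherTrailing (pvGatherObject ls o d s).2 t).2 .comments [] [] [] 0 false
        (units ++ [(String.ofList c, String.ofList (pvGatherObject ls o d s).1,
          String.ofList (pvGatherTrailing (pvGatherObject ls o d s).2 t).1)])) := by
  induction ls generalizing o d s t with
  | nil => rw [pvRunB]; simp [pvGatherObject, pvGatherTrailing]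
  | cons l rest ih =>
    rw [pvRunB]
    simp only [pvGatherObject]
    split_ifs <;>
      first
        | (rw [pvRunB_trailing]; simp_all)
        | (rw [ih]; simp_all)

-- B's COMMENTS run computes A's comments gather, then behaves as the object run (EOF = no push)
theorem pvRunB_comments (ls : List (List Char)) (c : List Char)
    (units : List (String × String × String)) :
    pvRunB ls .comments c [] [] 0 false units =
      (if (pvGatherComments ls c).2 = [] then units
      else pvRunB (pvGatherComments ls c).2 .object (pvGatherComments ls c).1 [] [] 0 false units) := by
  induction ls generalizing c with
  | nil => rw [pvRunB]; simp [pvGatherComments]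
  | cons l rest ih =>
    rw [pvRunB, pvGatherComments]
    split
    · simp
    · exact ih _

-- the two loop skeletons agree, by strong induction on the number of remaining lines
theorem pvOuterA_eq_pvRunB (ls : List (List Char)) (units : List (String × String × String)) :
    pvOuterA ls units = pvRunB ls .comments [] [] [] 0 false units := by
  induction hn : ls.length using Nat.strong_induction_on generalizing ls units with
  | _ n ih =>
  rw [pvOuterA, pvRunB_comments]
  by_cases h : (pvGatherComments ls []).2 = []
  · simp [h]
  · rw [dif_neg h, if_neg h, pvRunB_object]
    by_cases h3 : (pvGatherTrailing (pvGatherObject (pvGatherComments ls []).2 [] 0 false).2 []).2 = []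
    · rw [if_pos h3, h3, pvOuterA]
      simp [pvGatherComments]
    · rw [if_neg h3]
      subst hn
      refine ih _ ?_ _ _ rfl
      calc (pvGatherTrailing (pvGatherObject (pvGatherComments ls []).2 [] 0 false).2 []).2.length
          ≤ (pvGatherObject (pvGatherComments ls []).2 [] 0 false).2.length :=
            pvGatherTrailing_len _ _
        _ < (pvGatherComments ls []).2.length := pvGatherObject_len _ _ _ _ h
        _ ≤ ls.length := pvGatherComments_len _ _

-- ===== VERDICT (by name: the statement is the Claim_ definition above) =====
theorem split_units_spec : Claim_equal_split_units := by
  intro array_text _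
  unfold Spec_split_units split_units split_units_alt
  exact pvOuterA_eq_pvRunB _ _
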